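-- pv_equiv track=rewrite | github.com/miliar/Code_Jam_Webscraper | Solutions_python/Problem_212/111.py | solve
-- ===== SOURCE A (Python) =====
-- def p2(M):
--     new = M
--     return new
--
-- def p3(M):
--     new = []
--
--     M0 = M.count(0)
--     M1 = M.count(1)
--     M2 = M.count(2)
--
--     while M0:
--         new.append(0)
--         M0 -= 1
--
--     while M1 and M2:
--         new.append(1)
--         new.append(2)
--         M1 -= 1
--         M2 -= 1
--
--     while M1:
--         new.append(1)
--         M1 -= 1
--
--     while M2:
--         new.append(2)
--         M2 -= 1
--
--     return new
--
-- def p4(M):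
--     new = []
--
--     M0 = M.count(0)
--     M1 = M.count(1)
--     M2 = M.count(2)
--     M3 = M.count(3)
--
--     while M0:
--         new.append(0)
--         M0 -= 1
--
--     while M1 and M3:
--         new.append(1)
--         new.append(3)
--         M1 -= 1
--         M3 -= 1
--
--     while M2:
--         new.append(2)
--         M2 -= 1
--
--     while M1:
--         new.append(1)
--         M1 -= 1
--
--     while M3:
--         new.append(3)
--         M3 -= 1
--
--     return new
--
-- def solve(N,P,G):
--
--     M = []
--     for g in G:
--         M.append(g%P)
--     M.sort()
--
--     if   P == 2:
--         M = p2(M)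
--     elif P == 3:
--         M = p3(M)
--     elif P == 4:
--         M = p4(M)
--
--     fresh = 0
--     total = 0
--     for m in M:
--         if total % P == 0:
--             fresh += 1
--         total += m
--
--     return fresh
-- ===== SOURCE B (Python) =====
-- def solve(N, P, G):
--     # Arithmetic re-implementation: count residues once, then compute the number of
--     # fresh positions per residue block directly from counts and running totals;
--     # the rearranged list A materialises is never constructed or scanned.
--     cnt = {}
--     for g in G:
--         r = g % P
--         cnt[r] = cnt.get(r, 0) + 1
--
--     def c(v):
--         return cnt.get(v, 0)
--
--     def blockfresh(s, v, k):
--         # fresh positions contributed by k consecutive copies of v starting at total s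
--         return sum(1 for j in range(k) if (s + j * v) % P == 0)
--
--     if P == 2:
--         return c(0) + blockfresh(0, 1, c(1))
--     if P == 3:
--         m = min(c(1), c(2))
--         return (c(0) + m + blockfresh(3 * m, 1, c(1) - m)
--                 + blockfresh(3 * m + (c(1) - m), 2, c(2) - m))
--     if P == 4:
--         m = min(c(1), c(3))
--         s = 4 * m
--         fresh = c(0) + m + blockfresh(s, 2, c(2))
--         s += 2 * c(2)
--         fresh += blockfresh(s, 1, c(1) - m)
--         s += c(1) - m
--         return fresh + blockfresh(s, 3, c(3) - m)
--     fresh = 0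
--     s = 0
--     for v in sorted(cnt):
--         fresh += blockfresh(s, v, cnt[v])
--         s += v * cnt[v]
--     return fresh
-- ===== Notes on version B (the rewrite author's own statement) =====
-- stated objective: alternative
-- what changed: B never builds or scans the rearranged list: it counts residues once into a dict and computes the fresh count arithmetically per residue block (zeros and complementary pairs contribute closed-form terms; each leftover block contributes a count over its range of offsets), replacing A's sort + p2/p3/p4 list construction + final prefix-sum scan.
import Mathlib
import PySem

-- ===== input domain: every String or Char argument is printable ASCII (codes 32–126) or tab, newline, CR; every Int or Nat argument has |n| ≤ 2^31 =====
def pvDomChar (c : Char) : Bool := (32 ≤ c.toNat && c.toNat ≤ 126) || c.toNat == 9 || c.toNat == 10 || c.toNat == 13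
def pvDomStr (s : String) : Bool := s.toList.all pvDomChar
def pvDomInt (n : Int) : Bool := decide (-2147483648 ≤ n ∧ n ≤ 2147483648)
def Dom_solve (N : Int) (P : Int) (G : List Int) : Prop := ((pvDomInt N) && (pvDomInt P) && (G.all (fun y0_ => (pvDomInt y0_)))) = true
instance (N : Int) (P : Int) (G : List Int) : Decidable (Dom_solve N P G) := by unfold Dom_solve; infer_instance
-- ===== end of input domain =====

-- B replaces A's sort + p2/p3/p4 list rearrangement + final scan by a residue counter
-- and per-block arithmetic on counts: the arranged list is never built (objective: alternative).


-- ===== PORT A =====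
-- 'while C: new.append(v); C -= 1'  (C is a nonnegative count, so Nat fuel is exact)
def repLoop (v : Int) : Nat → List Int → List Int
  | 0, new => new
  | n+1, new => repLoop v n (new ++ [v])

-- 'while C1 and C2: new.append(a); new.append(b); C1 -= 1; C2 -= 1' returning (new, C1, C2)
def pairLoop (a b : Int) : Nat → Nat → List Int → (List Int × Nat × Nat)
  | m+1, k+1, new => pairLoop a b m k (new ++ [a, b])
  | m, k, new => (new, m, k)

def p2 (M : List Int) : List Int := M

def p3 (M : List Int) : List Int :=
  let M0 := PySem.List.count M 0
  let M1 := PySem.List.count M 1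
  let M2 := PySem.List.count M 2
  let new := repLoop 0 M0 []
  let s := pairLoop 1 2 M1 M2 new
  let new := repLoop 1 s.2.1 s.1
  let new := repLoop 2 s.2.2 new
  new

def p4 (M : List Int) : List Int :=
  let M0 := PySem.List.count M 0
  let M1 := PySem.List.count M 1
  let M2 := PySem.List.count M 2
  let M3 := PySem.List.count M 3
  let new := repLoop 0 M0 []
  let s := pairLoop 1 3 M1 M3 new
  let new := repLoop 2 M2 s.1
  let new := repLoop 1 s.2.1 new
  let new := repLoop 3 s.2.2 new
  new

-- the body of A's final 'for m in M' loop, over the state (fresh, total)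
def step (P : Int) (st : Int × Int) (m : Int) : Int × Int :=
  (if PySem.Int.mod st.2 P == 0 then st.1 + 1 else st.1, st.2 + m)

def solve (N : Int) (P : Int) (G : List Int) : Int :=
  let M := G.map (fun g => PySem.Int.mod g P)
  let M := PySem.List.sorted M (fun x => x) false
  let M := if P == 2 then p2 M else if P == 3 then p3 M else if P == 4 then p4 M else M
  (M.foldl (step P) ((0 : Int), (0 : Int))).1

-- ===== PORT B =====
-- 'sum(1 for j in range(k) if (s + j*v) % P == 0)'
def blockfresh (P s v k : Int) : Int :=
  (((PySem.List.pyRange 0 k 1).countP (fun j => PySem.Int.mod (s + j * v) P == 0) : Nat) : Int)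

def solve_alt (N : Int) (P : Int) (G : List Int) : Int :=
  let cnt := G.foldl (fun d g => d.insert (PySem.Int.mod g P) (d.getD (PySem.Int.mod g P) 0 + 1))
    PySem.Dict.empty
  let c : Int → Int := fun v => cnt.getD v 0
  if P == 2 then
    c 0 + blockfresh P 0 1 (c 1)
  else if P == 3 then
    let m := min (c 1) (c 2)
    c 0 + m + blockfresh P (3 * m) 1 (c 1 - m) + blockfresh P (3 * m + (c 1 - m)) 2 (c 2 - m)
  else if P == 4 then
    let m := min (c 1) (c 3)
    let s := 4 * m
    let fresh := c 0 + m + blockfresh P s 2 (c 2)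
    let s := s + 2 * c 2
    let fresh := fresh + blockfresh P s 1 (c 1 - m)
    let s := s + (c 1 - m)
    fresh + blockfresh P s 3 (c 3 - m)
  else
    ((PySem.List.sorted cnt.keys (fun x => x) false).foldl
      (fun st v => (st.1 + blockfresh P st.2 v (cnt.getD v 0), st.2 + v * cnt.getD v 0))
      ((0 : Int), (0 : Int))).1

-- ===== PRECONDITION & SPEC =====
-- Pre excludes exactly the inputs where Python A raises ZeroDivisionError: P = 0 with a
-- nonempty G (g % P, resp. total % P).
def Pre_solve (N : Int) (P : Int) (G : List Int) : Prop := P ≠ 0 ∨ G = []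
instance (N : Int) (P : Int) (G : List Int) : Decidable (Pre_solve N P G) := by
  unfold Pre_solve; infer_instance

def pvWitness_solve : Int × Int × List Int := (3, 3, [1, 2, 5])

def Spec_solve (N : Int) (P : Int) (G : List Int) (out : Int) : Prop := out = solve_alt N P G
instance (N : Int) (P : Int) (G : List Int) (out : Int) : Decidable (Spec_solve N P G out) := by
  unfold Spec_solve; infer_instance

-- ===== CLAIM (what is proved, stated in full; the proofs are below) =====
def Claim_equal_solve : Prop := ∀ (N : Int) (P : Int) (G : List Int),
  Dom_solve N P G → Pre_solve N P G → Spec_solve N P G (solve N P G)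

-- ===== LEMMAS AND PROOFS =====

theorem repLoop_eq (v : Int) : ∀ (n : Nat) (new : List Int),
    repLoop v n new = new ++ List.replicate n v := by
  intro n
  induction n with
  | zero => intro new; simp [repLoop]
  | succ n ih =>
    intro new
    simp [repLoop, ih, List.replicate_succ]

theorem pairLoop_eq (a b : Int) : ∀ (m k : Nat) (new : List Int),
    pairLoop a b m k new =
      (new ++ (List.replicate (min m k) [a, b]).flatten, m - min m k, k - min m k) := by
  intro m
  induction m with
  | zero => intro k new; cases k <;> simp [pairLoop]
  | succ m ih =>
    intro k new
    cases k with
    | zero => simp [pairLoop]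
    | succ k =>
      have : min (m + 1) (k + 1) = min m k + 1 := by omega
      simp [pairLoop, ih, this, List.replicate_succ]

-- counts seen through B's dict loop (the counter over the residue list R)
theorem cnt_getD (R : List Int) (v : Int) :
    (R.foldl (fun d r => d.insert r (d.getD r 0 + 1)) PySem.Dict.empty).getD v 0
      = (List.count v R : Int) := by
  rw [PySem.Dict.foldl_insert_getD_add_one_eq_counter, PySem.Dict.getD_counter]

-- count of a flatMap of constant blocks over a Nodup key list
theorem count_flatMap_replicate (n : Int → Nat) :
    ∀ (K : List Int), K.Nodup → ∀ (x : Int),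
      List.count x (K.flatMap (fun v => List.replicate (n v) v))
        = if x ∈ K then n x else 0 := by
  intro K
  induction K with
  | nil => intro _ x; simp
  | cons v K ih =>
    intro hnd x
    have hndK : K.Nodup := hnd.of_cons
    simp only [List.flatMap_cons, List.count_append, List.count_replicate, ih hndK,
      List.mem_cons]
    by_cases hx : x = v
    · subst hx
      have : x ∉ K := by
        intro h; exact (List.nodup_cons.mp hnd).1 h
      simp [this]
    · simp [hx]
      intro h; exact absurd h.symm hx

theorem pairwise_flatMap_replicate (n : Int → Nat) :
    ∀ (K : List Int), K.Pairwise (· < ·) →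
      (K.flatMap (fun v => List.replicate (n v) v)).Pairwise (· ≤ ·) := by
  intro K
  induction K with
  | nil => intro _; simp
  | cons v K ih =>
    intro hp
    have hpK : K.Pairwise (· < ·) := hp.of_cons
    have hlt : ∀ w ∈ K, v < w := (List.pairwise_cons.mp hp).1
    simp only [List.flatMap_cons]
    rw [List.pairwise_append]
    refine ⟨?_, ih hpK, ?_⟩
    · exact List.pairwise_replicate.mpr (Or.inr le_rfl)
    · intro x hx y hy
      have hxv : x = v := List.eq_of_mem_replicate hx
      obtain ⟨w, hw, hyw⟩ := List.mem_flatMap.mp hy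
      have hyw' : y = w := List.eq_of_mem_replicate hyw
      subst hxv; subst hyw'
      exact le_of_lt (hlt _ hw)

-- the counting-sort identity: sorted R equals per-key replicates over sorted distinct keys
theorem counting_sort_eq (R : List Int) :
    PySem.List.sorted R (fun x => x) false
      = (PySem.List.sorted (PySem.Set.ofList R) (fun x => x) false).flatMap
          (fun v => List.replicate (List.count v R) v) := by
  set K := PySem.List.sorted (PySem.Set.ofList R) (fun x => x) false with hK
  have hKlt : K.Pairwise (· < ·) := PySem.List.sorted_ofList_pairwise_lt R
  have hKnd : K.Nodup := hKlt.nodup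
  have hmemK : ∀ x, x ∈ K ↔ x ∈ R := by
    intro x
    rw [hK, PySem.List.mem_sorted, PySem.Set.mem_ofList]
  apply PySem.List.sorted_id_eq_of_perm_of_pairwise
  · rw [List.perm_iff_count]
    intro a
    rw [count_flatMap_replicate (fun v => List.count v R) K hKnd a]
    by_cases ha : a ∈ K
    · simp [ha]
    · have : a ∉ R := fun h => ha ((hmemK a).mpr h)
      simp [ha, List.count_eq_zero.mpr this]
  · exact pairwise_flatMap_replicate _ K hKlt

-- residues mod 2 are 0 or 1
theorem mem_res_two (G : List Int) (x : Int) (hx : x ∈ G.map (fun g => PySem.Int.mod g 2)) :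
    x = 0 ∨ x = 1 := by
  obtain ⟨g, _, rfl⟩ := List.mem_map.mp hx
  have h1 := PySem.Int.mod_nonneg g (b := 2) (by norm_num)
  have h2 := PySem.Int.mod_lt g (b := 2) (by norm_num)
  omega

-- sorted of a {0,1}-valued list is its zeros then its ones
theorem sorted_zero_one (R : List Int) (h : ∀ x ∈ R, x = 0 ∨ x = 1) :
    PySem.List.sorted R (fun x => x) false
      = List.replicate (List.count 0 R) 0 ++ List.replicate (List.count 1 R) 1 := by
  apply PySem.List.sorted_id_eq_of_perm_of_pairwise
  · rw [List.perm_iff_count]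
    intro a
    simp only [List.count_append, List.count_replicate]
    by_cases h0 : a = 0
    · subst h0
      simp
    · by_cases h1 : a = 1
      · subst h1; simp
      · have : a ∉ R := fun hm => by rcases h a hm with h' | h' <;> simp_all
        simp [List.count_eq_zero.mpr this, Ne.symm h0, Ne.symm h1]
  · rw [List.pairwise_append]
    refine ⟨List.pairwise_replicate.mpr (Or.inr le_rfl),
      List.pairwise_replicate.mpr (Or.inr le_rfl), ?_⟩
    intro x hx y hy
    rw [List.eq_of_mem_replicate hx, List.eq_of_mem_replicate hy]
    norm_num

-- Int min / toNat bookkeeping between A's Nat counts and B's Int counts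
theorem min_cast (a b : Nat) : min (a : Int) (b : Int) = ((min a b : Nat) : Int) := by omega

theorem sub_min_left_cast (a b : Nat) :
    (a : Int) - ((min a b : Nat) : Int) = ((a - min a b : Nat) : Int) := by omega

theorem sub_min_right_cast (a b : Nat) :
    (b : Int) - ((min a b : Nat) : Int) = ((b - min a b : Nat) : Int) := by omega

-- counts commute with sorting
theorem count_sorted (R : List Int) (v : Int) :
    List.count v (PySem.List.sorted R (fun x => x) false) = List.count v R :=
  (PySem.List.sorted_perm R (fun x => x) false).count_eq v

-- B's blockfresh with a Nat-cast length, as a countP over List.range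
theorem blockfresh_natCast (P s v : Int) (k : Nat) :
    blockfresh P s v (k : Int)
      = ((List.range k).countP (fun (j : Nat) => PySem.Int.mod (s + (j : Int) * v) P == 0) : Int) := by
  unfold blockfresh
  rw [PySem.List.pyRange_one, List.countP_map]
  simp only [Function.comp_def, zero_add, sub_zero, Int.toNat_natCast]

-- A's scan over one constant block: fresh grows by the block's countP, total by v*k
theorem scan_replicate (P v : Int) : ∀ (k : Nat) (st : Int × Int),
    (List.replicate k v).foldl (step P) st
      = (st.1 + ((List.range k).countP (fun (j : Nat) => PySem.Int.mod (st.2 + (j : Int) * v) P == 0) : Int),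
         st.2 + v * (k : Int)) := by
  intro k
  induction k with
  | zero => intro st; simp
  | succ k ih =>
    intro st
    rw [List.replicate_succ, List.foldl_cons, step, ih]
    dsimp only
    have hpred : ((List.range k).countP
        (fun (j : Nat) => PySem.Int.mod ((st.2 + v) + (j : Int) * v) P == 0))
        = ((List.range k).countP (fun (j : Nat) => PySem.Int.mod (st.2 + ((j + 1 : Nat) : Int) * v) P == 0)) := by
      apply List.countP_congr
      intro j _
      have : (st.2 + v) + (j : Int) * v = st.2 + ((j + 1 : Nat) : Int) * v := by push_cast; ring
      rw [this]
    rw [hpred]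
    rw [List.range_succ_eq_map, List.countP_cons, List.countP_map]
    simp only [Function.comp_def, Nat.cast_zero, zero_mul, add_zero]
    rw [Prod.mk.injEq]
    constructor
    · split_ifs <;> push_cast <;> ring
    · push_cast; ring

-- the zero block contributes its full length (entered at total 0)
theorem countP_zero_block (P : Int) (k : Nat) :
    ((List.range k).countP (fun (j : Nat) => PySem.Int.mod ((0 : Int) + (j : Int) * 0) P == 0) : Int)
      = (k : Int) := by
  have h0 : PySem.Int.mod 0 P = 0 := (PySem.Int.mod_eq_zero_iff_dvd 0 P).mpr (dvd_zero P)
  simp [h0]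

-- a (1,2)-pair block entered at a multiple of 3: one fresh per pair, total grows by 3
theorem scan_pairs3 : ∀ (m : Nat) (st : Int × Int), (3 : Int) ∣ st.2 →
    ((List.replicate m ([1, 2] : List Int)).flatten).foldl (step 3) st
      = (st.1 + (m : Int), st.2 + 3 * (m : Int)) := by
  intro m
  induction m with
  | zero => intro st _; simp
  | succ m ih =>
    intro st hs
    rw [List.replicate_succ, List.flatten_cons, List.foldl_append]
    have h1 : PySem.Int.mod st.2 3 = 0 := (PySem.Int.mod_eq_zero_iff_dvd st.2 3).mpr hs
    have h2 : PySem.Int.mod (st.2 + 1) 3 ≠ 0 := by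
      rw [Ne, PySem.Int.mod_eq_zero_iff_dvd]
      omega
    simp only [List.foldl_cons, List.foldl_nil, step, h1, beq_self_eq_true, if_true]
    rw [if_neg (by simpa using h2)]
    rw [ih ((st.1 + 1, st.2 + 1 + 2) : Int × Int) (by dsimp only; omega)]
    rw [Prod.mk.injEq]
    dsimp only
    constructor <;> push_cast <;> ring

-- a (1,3)-pair block entered at a multiple of 4: one fresh per pair, total grows by 4
theorem scan_pairs4 : ∀ (m : Nat) (st : Int × Int), (4 : Int) ∣ st.2 →
    ((List.replicate m ([1, 3] : List Int)).flatten).foldl (step 4) st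
      = (st.1 + (m : Int), st.2 + 4 * (m : Int)) := by
  intro m
  induction m with
  | zero => intro st _; simp
  | succ m ih =>
    intro st hs
    rw [List.replicate_succ, List.flatten_cons, List.foldl_append]
    have h1 : PySem.Int.mod st.2 4 = 0 := (PySem.Int.mod_eq_zero_iff_dvd st.2 4).mpr hs
    have h2 : PySem.Int.mod (st.2 + 1) 4 ≠ 0 := by
      rw [Ne, PySem.Int.mod_eq_zero_iff_dvd]
      omega
    simp only [List.foldl_cons, List.foldl_nil, step, h1, beq_self_eq_true, if_true]
    rw [if_neg (by simpa using h2)]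
    rw [ih ((st.1 + 1, st.2 + 1 + 3) : Int × Int) (by dsimp only; omega)]
    rw [Prod.mk.injEq]
    dsimp only
    constructor <;> push_cast <;> ring

-- A's scan over the concatenation of blocks equals B's per-key fold
theorem scan_flatMap (P : Int) (n : Int → Nat) : ∀ (K : List Int) (st : Int × Int),
    (K.flatMap (fun v => List.replicate (n v) v)).foldl (step P) st
      = K.foldl (fun st v =>
          (st.1 + ((List.range (n v)).countP
              (fun (j : Nat) => PySem.Int.mod (st.2 + (j : Int) * v) P == 0) : Int),
           st.2 + v * ((n v : Nat) : Int))) st := by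
  intro K
  induction K with
  | nil => intro st; simp
  | cons v K ih =>
    intro st
    rw [List.flatMap_cons, List.foldl_append, scan_replicate, List.foldl_cons, ih]

-- ===== the main equality =====
theorem solve_eq_alt (N P : Int) (G : List Int) : solve N P G = solve_alt N P G := by
  unfold solve solve_alt
  simp only []
  set R := G.map (fun g => PySem.Int.mod g P) with hR
  have hcnt : G.foldl (fun d g => d.insert (PySem.Int.mod g P) (d.getD (PySem.Int.mod g P) (0 : Int) + 1))
      PySem.Dict.empty = R.foldl (fun d r => d.insert r (d.getD r (0 : Int) + 1)) PySem.Dict.empty := by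
    rw [hR, List.foldl_map]
  rw [hcnt]
  by_cases h2 : P = 2
  · subst h2
    simp only [beq_self_eq_true, if_true, p2]
    rw [sorted_zero_one R (fun x hx => mem_res_two G x (hR ▸ hx))]
    rw [List.foldl_append, scan_replicate, scan_replicate, cnt_getD, cnt_getD,
      blockfresh_natCast, countP_zero_block]
    simp only [zero_add, add_zero, zero_mul]
  · by_cases h3 : P = 3
    · subst h3
      simp only [show ((3 : Int) == 2) = false by decide, show ((3 : Int) == 3) = true by decide,
        Bool.false_eq_true, if_false, if_true, p3]
      simp only [PySem.List.count_eq]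
      rw [count_sorted, count_sorted, count_sorted]
      rw [repLoop_eq, pairLoop_eq, repLoop_eq, repLoop_eq]
      simp only [List.nil_append]
      rw [List.foldl_append, List.foldl_append, List.foldl_append]
      simp only [scan_replicate, countP_zero_block]
      rw [scan_pairs3 _ _ (by dsimp only; omega)]
      rw [cnt_getD, cnt_getD, cnt_getD, min_cast, sub_min_left_cast, sub_min_right_cast,
        blockfresh_natCast, blockfresh_natCast]
      simp only [zero_add, add_zero, zero_mul, one_mul]
    · by_cases h4 : P = 4
      · subst h4
        simp only [show ((4 : Int) == 2) = false by decide, show ((4 : Int) == 3) = false by decide,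
          show ((4 : Int) == 4) = true by decide, Bool.false_eq_true, if_false, if_true, p4]
        simp only [PySem.List.count_eq]
        rw [count_sorted, count_sorted, count_sorted, count_sorted]
        rw [repLoop_eq, pairLoop_eq, repLoop_eq, repLoop_eq, repLoop_eq]
        simp only [List.nil_append]
        rw [List.foldl_append, List.foldl_append, List.foldl_append, List.foldl_append]
        simp only [scan_replicate, countP_zero_block]
        rw [scan_pairs4 _ _ (by dsimp only; omega)]
        rw [cnt_getD, cnt_getD, cnt_getD, cnt_getD, min_cast, sub_min_left_cast,
          sub_min_right_cast, blockfresh_natCast, blockfresh_natCast, blockfresh_natCast]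
        simp only [zero_add, add_zero, zero_mul, one_mul]
      · have e2 : (P == 2) = false := by simp [h2]
        have e3 : (P == 3) = false := by simp [h3]
        have e4 : (P == 4) = false := by simp [h4]
        simp only [e2, e3, e4, Bool.false_eq_true, if_false]
        rw [counting_sort_eq R, scan_flatMap]
        simp only [PySem.Dict.foldl_insert_getD_add_one_eq_counter, PySem.Dict.keys_counter,
          PySem.Dict.getD_counter, blockfresh_natCast]

-- ===== VERDICT (by name: the statement is the Claim_ definition above) =====
theorem solve_spec : Claim_equal_solve := by
  intro N P G _ _
  unfold Spec_solve
  exact solve_eq_alt N P G
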